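-- pv_equiv track=rewrite | github.com/banrieen/notebook2Pro | CookBook/Algorithms/面试题0620.py | huiwen
-- ===== SOURCE A (Python) =====
-- def huiwen(s,i,step,rst):
--     if i > len(s) - 1:
--         return rst
--     if s[i] != s[i+step] and s[i+step] == "" and i+step < len(s) - 1:
--         step += 1
--         return huiwen(s,i,step,rst)
--     elif s[i] == s[i+step] and i+step < len(s) - 1:
--         rst = s[i] + '+'*step + s[i+step]
--         i += step
--         step = 1
--         return huiwen(s,i,step,rst)
--     elif s[i] != s[i+step] and s[i+step] != "" and i+step < len(s) - 1:
--         i += step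
--         step = 1
--         return huiwen(s,i,step,rst)
--     else:
--         rst = s[i] + '_'*step + s[i+step]
--         return rst
-- ===== SOURCE B (Python) =====
-- def huiwen(s, i, step, rst):
--     n = len(s)
--     if i > n - 1:
--         return rst
--     while True:
--         k = i + step
--         if k >= n - 1:
--             return s[i] + '_' * step + s[k]
--         if s[k] == "" and s[i] != "":
--             step += 1
--         else:
--             i, step = k, 1
-- ===== Notes on version B (the rewrite author's own statement) =====
-- stated objective: simpler
-- what changed: Replaced the 4-way tail recursion threading a mostly-dead rst accumulator by a plain loop over (i, step) that checks the terminal condition first and returns the answer directly, collapsing the two advance branches into one.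
-- outside the precondition, e.g. on huiwen(['a', 'b', 'c'], -3, 1, ''): A returns 'b_c', B returns 'b_c'; on huiwen(['a', 'b', 'c'], 1, -1, 'x'): A returns 'b_c', B returns 'b_c'
import Mathlib
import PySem

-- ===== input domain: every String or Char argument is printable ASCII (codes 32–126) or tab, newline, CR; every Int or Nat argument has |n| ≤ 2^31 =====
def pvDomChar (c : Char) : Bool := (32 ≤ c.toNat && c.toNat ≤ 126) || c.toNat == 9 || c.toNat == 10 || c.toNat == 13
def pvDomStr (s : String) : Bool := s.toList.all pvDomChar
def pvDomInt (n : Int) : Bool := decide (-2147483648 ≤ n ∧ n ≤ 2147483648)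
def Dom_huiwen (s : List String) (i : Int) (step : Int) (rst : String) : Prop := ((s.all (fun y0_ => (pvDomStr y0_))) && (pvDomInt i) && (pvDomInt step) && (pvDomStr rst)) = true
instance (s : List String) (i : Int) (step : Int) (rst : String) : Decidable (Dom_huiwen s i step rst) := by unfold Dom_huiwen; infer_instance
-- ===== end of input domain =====

-- B replaces A's tail recursion carrying a mostly-dead `rst` by a plain loop over (i, step)
-- that returns directly from the single terminal case (objective: simpler).

-- s[j] for both ports; Python raises where pyGet? is none — those inputs are outside Pre_huiwen,
-- so the "" default is never relied on by the claim.
def pvGetS (s : List String) (j : Int) : String := (PySem.List.pyGet? s j).getD ""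

-- ===== PORT A =====
def huiwenFuel : Nat → List String → Int → Int → String → String
  | 0, _, _, _, rst => rst   -- fuel guard only; never reached under Pre_huiwen
  | fuel+1, s, i, step, rst =>
    if i > (s.length : Int) - 1 then rst
    else if pvGetS s i ≠ pvGetS s (i+step) ∧ pvGetS s (i+step) = "" ∧ i+step < (s.length : Int) - 1 then
      huiwenFuel fuel s i (step+1) rst
    else if pvGetS s i = pvGetS s (i+step) ∧ i+step < (s.length : Int) - 1 then
      huiwenFuel fuel s (i+step) 1
        (pvGetS s i ++ String.ofList (List.replicate step.toNat '+') ++ pvGetS s (i+step))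
    else if pvGetS s i ≠ pvGetS s (i+step) ∧ pvGetS s (i+step) ≠ "" ∧ i+step < (s.length : Int) - 1 then
      huiwenFuel fuel s (i+step) 1 rst
    else
      pvGetS s i ++ String.ofList (List.replicate step.toNat '_') ++ pvGetS s (i+step)

def huiwen (s : List String) (i : Int) (step : Int) (rst : String) : String :=
  huiwenFuel (2 * s.length + 3) s i step rst

-- ===== PORT B =====
def huiwenLoop : Nat → List String → Int → Int → String
  | 0, _, _, _ => ""   -- fuel guard only; never reached under Pre_huiwen
  | fuel+1, s, i, step =>
    if i + step ≥ (s.length : Int) - 1 then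
      pvGetS s i ++ String.ofList (List.replicate step.toNat '_') ++ pvGetS s (i+step)
    else if pvGetS s (i+step) = "" ∧ pvGetS s i ≠ "" then
      huiwenLoop fuel s i (step+1)
    else
      huiwenLoop fuel s (i+step) 1

def huiwen_alt (s : List String) (i : Int) (step : Int) (rst : String) : String :=
  if i > (s.length : Int) - 1 then rst
  else huiwenLoop (2 * s.length + 3) s i step

-- ===== PRECONDITION & SPEC =====
-- Pre_ excludes negative i or step and overshooting i+step: there A either raises IndexError
-- or returns only via Python's accidental negative-index wraparound traversal, which is off
-- the function's natural domain (on part of those excluded inputs A does return and B's Python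
-- returns the same value).
def Pre_huiwen (s : List String) (i : Int) (step : Int) (rst : String) : Prop :=
  i > (s.length : Int) - 1 ∨ (0 ≤ i ∧ 0 ≤ step ∧ i + step ≤ (s.length : Int) - 1)
instance (s : List String) (i : Int) (step : Int) (rst : String) : Decidable (Pre_huiwen s i step rst) := by unfold Pre_huiwen; infer_instance

def pvWitness_huiwen : List String × Int × Int × String := (["a", "", "b"], 0, 1, "")

def Spec_huiwen (s : List String) (i : Int) (step : Int) (rst : String) (out : String) : Prop := out = huiwen_alt s i step rst
instance (s : List String) (i : Int) (step : Int) (rst : String) (out : String) : Decidable (Spec_huiwen s i step rst out) := by unfold Spec_huiwen; infer_instance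

-- ===== CLAIM (what is proved, stated in full; the proofs are below) =====
def Claim_equal_huiwen : Prop := ∀ (s : List String) (i : Int) (step : Int) (rst : String), Dom_huiwen s i step rst → Pre_huiwen s i step rst → Spec_huiwen s i step rst (huiwen s i step rst)

-- ===== LEMMAS AND PROOFS =====

-- Loop invariant: with 0 ≤ i, 0 ≤ step, i+step ≤ len-1 and enough fuel, A's recursion and
-- B's loop agree (rst is dead in A on this region: the terminal branch rebuilds the answer).
theorem huiwenFuel_eq_loop (f : Nat) : ∀ (s : List String) (i step : Int) (rst : String),
    0 ≤ i → 0 ≤ step → i + step ≤ (s.length : Int) - 1 →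
    ((s.length : Int) - 1 - i).toNat + ((s.length : Int) - 1 - (i + step)).toNat < f →
    huiwenFuel f s i step rst = huiwenLoop f s i step := by
  induction f with
  | zero => intro s i step rst _ _ _ hf; omega
  | succ f ih =>
    intro s i step rst hi hstep hle hf
    have hin : ¬ i > (s.length : Int) - 1 := by omega
    simp only [huiwenFuel, huiwenLoop]
    rw [if_neg hin]
    by_cases hk : i + step < (s.length : Int) - 1
    · rw [if_neg (by omega : ¬ i + step ≥ (s.length : Int) - 1)]
      by_cases hb : pvGetS s (i + step) = ""
      · by_cases ha : pvGetS s i = pvGetS s (i + step)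
        · have ha0 : pvGetS s i = "" := ha.trans hb
          rw [if_neg (fun h => h.1 ha), if_pos ⟨ha, hk⟩,
            if_neg (fun h => h.2 ha0)]
          apply ih <;> omega
        · have ha0 : pvGetS s i ≠ "" := fun h => ha (h.trans hb.symm)
          rw [if_pos ⟨ha, hb, hk⟩, if_pos ⟨hb, ha0⟩]
          apply ih <;> omega
      · by_cases ha : pvGetS s i = pvGetS s (i + step)
        · rw [if_neg (fun h => h.1 ha), if_pos ⟨ha, hk⟩,
            if_neg (fun h => hb h.1)]
          apply ih <;> omega
        · rw [if_neg (fun h => hb h.2.1), if_neg (fun h => ha h.1),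
            if_pos ⟨ha, hb, hk⟩, if_neg (fun h => hb h.1)]
          apply ih <;> omega
    · rw [if_neg (fun h => hk h.2.2), if_neg (fun h => hk h.2),
        if_neg (fun h => hk h.2.2), if_pos (by omega : i + step ≥ (s.length : Int) - 1)]

-- ===== VERDICT (by name: the statement is the Claim_ definition above) =====
theorem huiwen_spec : Claim_equal_huiwen := by
  intro s i step rst _ hpre
  unfold Spec_huiwen huiwen huiwen_alt
  by_cases hgt : i > (s.length : Int) - 1
  · have h3 : 2 * s.length + 3 = (2 * s.length + 2) + 1 := rfl
    rw [h3]
    simp only [huiwenFuel]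
    rw [if_pos hgt, if_pos hgt]
  · rcases hpre with h | ⟨hi, hstep, hle⟩
    · exact absurd h hgt
    · rw [if_neg hgt]
      apply huiwenFuel_eq_loop
      · exact hi
      · exact hstep
      · exact hle
      · omega
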